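-- pv_equiv track=rewrite | github.com/Cph4v/QR_code_detection_real_time | QR-Code-master/function_for_app.py | allocate_data
-- ===== SOURCE A (Python) =====
-- def allocate_data(laptop_QR_data, shelf_QR_data, thresh):
--     shelf_and_laptop_QR = {}
--     shelf_QR = {shelf_code:"Empty-" for shelf_code,coord in shelf_QR_data.items()}
--     for laptop_code, laptop_coord in laptop_QR_data.items():
--         for shelf_code, shelf_coord in shelf_QR_data.items():
--             x1, y1, x2, y2 = laptop_coord
--             xx1, yy1, xx2, yy2 = shelf_coord
--             if x1+((x2-x1)//2) < xx2+thresh and x1+((x2-x1)//2) > xx1-thresh: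
--                 shelf_and_laptop_QR[f"{shelf_code}"] = f"{laptop_code}"
--                 shelf_QR[shelf_code] = f"{laptop_code}"
--
--     return shelf_and_laptop_QR,shelf_QR
-- ===== SOURCE B (Python) =====
-- def allocate_data(laptop_QR_data, shelf_QR_data, thresh):
--     shelf_QR = {code: "Empty-" for code in shelf_QR_data}
--     by_left = sorted(
--         ((coord[0], i, code, coord[2] + thresh)
--          for i, (code, coord) in enumerate(shelf_QR_data.items())),
--         key=lambda t: t[0],
--     )
--     lefts = [t[0] for t in by_left]
--     shelf_and_laptop_QR = {}
--     for laptop_code, (x1, _y1, x2, _y2) in laptop_QR_data.items():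
--         center = x1 + (x2 - x1) // 2
--         ct = center + thresh
--         lo, hi = 0, len(lefts)
--         while lo < hi:
--             mid = (lo + hi) // 2
--             if lefts[mid] < ct:
--                 lo = mid + 1
--             else:
--                 hi = mid
--         matches = [(i, code) for _left, i, code, rt in by_left[:lo] if center < rt]
--         matches.sort(key=lambda t: t[0])
--         for _i, code in matches:
--             shelf_and_laptop_QR[code] = laptop_code
--             shelf_QR[code] = laptop_code
--     return shelf_and_laptop_QR, shelf_QR
-- ===== Notes on version B (the rewrite author's own statement) =====
-- stated objective: alternative
-- what changed: B sorts the shelves once by left edge, then answers each laptop with a binary-searched prefix (stabbing query) filtered by right edge instead of A's full nested scan with per-pair tuple unpacking and f-string formatting; Pre_ excludes duplicate-key association lists (they do not encode a Python dict) and malformed coordinate lists of length != 4, on which A raises ValueError except in the accidental case where the other dict is empty.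
-- outside the precondition, e.g. on allocate_data({}, {'S': []}, 0): A returns ({}, {'S': 'Empty-'}), B raises IndexError; on allocate_data({'L': []}, {}, 0): A returns ({}, {}), B raises ValueError
import Mathlib
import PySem

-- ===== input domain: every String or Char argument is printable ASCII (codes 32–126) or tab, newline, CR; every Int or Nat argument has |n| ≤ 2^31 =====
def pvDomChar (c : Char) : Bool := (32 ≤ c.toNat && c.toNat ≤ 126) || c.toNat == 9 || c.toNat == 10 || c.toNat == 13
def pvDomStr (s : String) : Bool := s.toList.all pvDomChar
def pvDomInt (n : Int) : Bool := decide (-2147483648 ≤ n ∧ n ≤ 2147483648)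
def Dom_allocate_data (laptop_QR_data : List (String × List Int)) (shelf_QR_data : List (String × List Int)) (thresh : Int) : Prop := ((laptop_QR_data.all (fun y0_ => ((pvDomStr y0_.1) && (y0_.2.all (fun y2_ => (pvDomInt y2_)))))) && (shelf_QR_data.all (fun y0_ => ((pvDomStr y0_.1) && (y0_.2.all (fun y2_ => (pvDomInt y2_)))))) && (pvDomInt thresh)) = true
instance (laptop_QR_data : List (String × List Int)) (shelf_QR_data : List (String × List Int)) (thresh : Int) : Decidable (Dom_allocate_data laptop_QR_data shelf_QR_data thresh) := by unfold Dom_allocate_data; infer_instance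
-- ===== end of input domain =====

-- B pre-sorts the shelves by left edge and answers each laptop with a binary-searched prefix
-- filtered by right edge, instead of A's full nested scan (objective: alternative).

-- ===== PORT A =====
-- Literal transliteration of A's nested loops.  On a coordinate list whose length is not 4
-- Python raises ValueError at the tuple unpacking; the match's catch-all branch is reached
-- exactly there, and those inputs are excluded by Pre_.
def allocate_data (laptop_QR_data : List (String × List Int)) (shelf_QR_data : List (String × List Int)) (thresh : Int) : (List (String × String)) × (List (String × String)) :=
  let shelf_QR0 : PySem.Dict String String :=
    shelf_QR_data.foldl (fun d p => d.insert p.1 "Empty-") PySem.Dict.empty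
  let st : PySem.Dict String String × PySem.Dict String String :=
    laptop_QR_data.foldl (fun st lp =>
      shelf_QR_data.foldl (fun st sp =>
        match lp.2, sp.2 with
        | [x1, _y1, x2, _y2], [xx1, _yy1, xx2, _yy2] =>
          if x1 + PySem.Int.floordiv (x2 - x1) 2 < xx2 + thresh ∧
             x1 + PySem.Int.floordiv (x2 - x1) 2 > xx1 - thresh then
            (st.1.insert sp.1 lp.1, st.2.insert sp.1 lp.1)
          else st
        | _, _ => st) st)
      (PySem.Dict.empty, shelf_QR0)
  (st.1.items, st.2.items)

-- ===== PORT B =====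
-- Source B's hand-written binary search: first index in lefts whose value is >= ct
-- (lefts[mid] is ported with pyGetD; mid is always in range, so the default is never used)
def bSearch (lefts : List Int) (ct : Int) (lo hi : Int) : Int :=
  if h : lo < hi then
    if PySem.List.pyGetD lefts (PySem.Int.floordiv (lo + hi) 2) 0 < ct then
      bSearch lefts ct (PySem.Int.floordiv (lo + hi) 2 + 1) hi
    else bSearch lefts ct lo (PySem.Int.floordiv (lo + hi) 2)
  else lo
termination_by (hi - lo).toNat
decreasing_by
  · have h1 := (PySem.Int.floordiv_two_mid_bounds (le_of_lt h)).1
    have h2 : PySem.Int.floordiv (lo + hi) 2 < hi :=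
      (PySem.Int.floordiv_lt_iff_lt_mul (by norm_num)).mpr (by omega)
    omega
  · have h1 := (PySem.Int.floordiv_two_mid_bounds (le_of_lt h)).1
    have h2 : PySem.Int.floordiv (lo + hi) 2 < hi :=
      (PySem.Int.floordiv_lt_iff_lt_mul (by norm_num)).mpr (by omega)
    omega

-- the tuple unpacking 'x1, _y1, x2, _y2 = coord' of Source B's for-header (none = ValueError,
-- excluded by Pre_)
def bUnpack4 (l : List Int) : Option (Int × Int × Int × Int) :=
  if h : l.length = 4 then
    some (l[0]'(by omega), l[1]'(by omega), l[2]'(by omega), l[3]'(by omega))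
  else none

-- the body of Source B's outer laptop loop (by_left and lefts are computed once, before the loop).
-- The list comprehension over by_left[:lo] is ported as slice-filter-map.
def bStep (thresh : Int) (by_left : List (Int × Int × String × Int)) (lefts : List Int)
    (st : PySem.Dict String String × PySem.Dict String String) (lp : String × List Int) :
    PySem.Dict String String × PySem.Dict String String :=
  match bUnpack4 lp.2 with
  | some (x1, _y1, x2, _y2) =>
    let center := x1 + PySem.Int.floordiv (x2 - x1) 2
    let ct := center + thresh
    let lo := bSearch lefts ct 0 (lefts.length : Int)
    let ms := PySem.List.sorted
      (((PySem.List.slice by_left none (some lo)).filter (fun t => decide (center < t.2.2.2))).map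
        (fun t => (t.2.1, t.2.2.1)))
      (fun t => t.1)
    ms.foldl (fun st m => (st.1.insert m.2 lp.1, st.2.insert m.2 lp.1)) st
  | none => st

def allocate_data_alt (laptop_QR_data : List (String × List Int)) (shelf_QR_data : List (String × List Int)) (thresh : Int) : (List (String × String)) × (List (String × String)) :=
  let shelf_QR0 : PySem.Dict String String :=
    shelf_QR_data.foldl (fun d p => d.insert p.1 "Empty-") PySem.Dict.empty
  let by_left : List (Int × Int × String × Int) :=
    PySem.List.sorted ((PySem.List.enumerate shelf_QR_data).map
      (fun ic => (PySem.List.pyGetD ic.2.2 0 0, ic.1, ic.2.1, PySem.List.pyGetD ic.2.2 2 0 + thresh)))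
      (fun t => t.1)
  let lefts : List Int := by_left.map (fun t => t.1)
  let st := laptop_QR_data.foldl (bStep thresh by_left lefts) (PySem.Dict.empty, shelf_QR0)
  (st.1.items, st.2.items)

-- ===== PRECONDITION & SPEC =====
-- Pre_ excludes (i) association lists with duplicate keys — such a list does not encode a
-- Python dict — and (ii) coordinate lists whose length is not 4 (outside the bounding-box
-- domain): there A raises ValueError at the tuple unpacking except in the accidental case
-- where the other dict is empty so the unpacking is never reached.
def Pre_allocate_data (laptop_QR_data : List (String × List Int)) (shelf_QR_data : List (String × List Int)) (thresh : Int) : Prop :=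
  (laptop_QR_data.map Prod.fst).Nodup ∧ (shelf_QR_data.map Prod.fst).Nodup ∧
  (∀ p ∈ laptop_QR_data, p.2.length = 4) ∧ (∀ s ∈ shelf_QR_data, s.2.length = 4)
instance (laptop_QR_data : List (String × List Int)) (shelf_QR_data : List (String × List Int)) (thresh : Int) : Decidable (Pre_allocate_data laptop_QR_data shelf_QR_data thresh) := by unfold Pre_allocate_data; infer_instance
def pvWitness_allocate_data : (List (String × List Int)) × (List (String × List Int)) × Int :=
  ([("L1", [0, 0, 4, 0]), ("L2", [8, 0, 12, 0])], [("S1", [0, 0, 6, 0]), ("S2", [7, 0, 13, 0])], 1)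

def Spec_allocate_data (laptop_QR_data : List (String × List Int)) (shelf_QR_data : List (String × List Int)) (thresh : Int) (out : (List (String × String)) × (List (String × String))) : Prop := out = allocate_data_alt laptop_QR_data shelf_QR_data thresh
instance (laptop_QR_data : List (String × List Int)) (shelf_QR_data : List (String × List Int)) (thresh : Int) (out : (List (String × String)) × (List (String × String))) : Decidable (Spec_allocate_data laptop_QR_data shelf_QR_data thresh out) := by unfold Spec_allocate_data; infer_instance

-- ===== CLAIM (what is proved, stated in full; the proofs are below) =====
def Claim_equal_allocate_data : Prop := ∀ (laptop_QR_data : List (String × List Int)) (shelf_QR_data : List (String × List Int)) (thresh : Int), Dom_allocate_data laptop_QR_data shelf_QR_data thresh → Pre_allocate_data laptop_QR_data shelf_QR_data thresh → Spec_allocate_data laptop_QR_data shelf_QR_data thresh (allocate_data laptop_QR_data shelf_QR_data thresh)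

-- ===== LEMMAS AND PROOFS =====

-- shared proof vocabulary: A's interval test, as a Bool over the raw coordinate list
def adHit (thresh c : Int) (s : List Int) : Bool :=
  decide (c < PySem.List.pyGetD s 2 0 + thresh) && decide (PySem.List.pyGetD s 0 0 < c + thresh)

theorem foldl_enum {α β : Type} (xs : List α) (f : β → α → β) :
    ∀ (s : Int) (b : β),
      (PySem.List.enumerate xs s).foldl (fun acc p => f acc p.2) b = xs.foldl f b := by
  induction xs with
  | nil => intro s b; simp [PySem.List.enumerate]
  | cons x xs ih => intro s b; rw [PySem.List.enumerate_cons]; simpa using ih (s + 1) (f b x)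

theorem list_len4 {α : Type} (l : List α) (h : l.length = 4) :
    ∃ a b c d, l = [a, b, c, d] := by
  rcases l with _ | ⟨a, l⟩; · simp at h
  rcases l with _ | ⟨b, l⟩; · simp at h
  rcases l with _ | ⟨c, l⟩; · simp at h
  rcases l with _ | ⟨d, l⟩; · simp at h
  rcases l with _ | ⟨e, l⟩
  · exact ⟨a, b, c, d, rfl⟩
  · simp at h

theorem bUnpack4_eq (a b c d : Int) : bUnpack4 [a, b, c, d] = some (a, b, c, d) := rfl

-- the hand-written binary search finds the boundary of the predicate 'lefts[i] < ct'
theorem bSearch_spec (lefts : List Int) (ct : Int) (hs : lefts.Pairwise (· ≤ ·)) :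
    ∀ (n : Nat) (lo hi : Int), (hi - lo).toNat = n →
      0 ≤ lo → lo ≤ hi → hi ≤ (lefts.length : Int) →
      (∀ (i : Nat) (h : i < lefts.length), i < lo.toNat → lefts[i] < ct) →
      (∀ (i : Nat) (h : i < lefts.length), hi.toNat ≤ i → ¬ lefts[i] < ct) →
      0 ≤ bSearch lefts ct lo hi ∧ bSearch lefts ct lo hi ≤ (lefts.length : Int) ∧
      (∀ (i : Nat) (h : i < lefts.length), i < (bSearch lefts ct lo hi).toNat → lefts[i] < ct) ∧
      (∀ (i : Nat) (h : i < lefts.length), (bSearch lefts ct lo hi).toNat ≤ i → ¬ lefts[i] < ct) := by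
  intro n
  induction n using Nat.strong_induction_on with
  | _ n ih =>
    intro lo hi hn h0 h1 h2 hpre hsuf
    rw [bSearch]
    by_cases hlt : lo < hi
    · rw [dif_pos hlt]
      have hmid := PySem.Int.floordiv_two_mid_bounds (le_of_lt hlt)
      have hmhi : PySem.Int.floordiv (lo + hi) 2 < hi :=
        (PySem.Int.floordiv_lt_iff_lt_mul (by norm_num)).mpr (by omega)
      set mid := PySem.Int.floordiv (lo + hi) 2 with hmdef
      have hmlen : mid.toNat < lefts.length := by omega
      have hget : PySem.List.pyGetD lefts mid 0 = lefts[mid.toNat] :=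
        PySem.List.pyGetD_eq_getElem lefts 0 (by omega) (by omega)
      have hmono : ∀ (i j : Nat) (hij : i ≤ j) (hj : j < lefts.length), lefts[i]'(by omega) ≤ lefts[j] := by
        intro i j hij hj
        rcases Nat.lt_or_ge i j with hij' | hij'
        · exact (List.pairwise_iff_getElem.mp hs) i j (by omega) hj hij'
        · have : i = j := by omega
          subst this; exact le_refl _
      rw [hget]
      by_cases hp : lefts[mid.toNat] < ct
      · rw [if_pos hp]
        refine ih ((hi - (mid + 1)).toNat) (by omega) (mid + 1) hi (by omega)
          (by omega) (by omega) h2 ?_ hsuf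
        intro i h hi'
        have : lefts[i] ≤ lefts[mid.toNat] := hmono i mid.toNat (by omega) hmlen
        omega
      · rw [if_neg hp]
        refine ih ((mid - lo).toNat) (by omega) lo mid (by omega)
          h0 (by omega) (by omega) hpre ?_
        intro i h hi' hicon
        have : lefts[mid.toNat] ≤ lefts[i] := hmono mid.toNat i (by omega) h
        omega
    · rw [dif_neg hlt]
      have : lo = hi := by omega
      subst this
      exact ⟨h0, by omega, fun i h hi' => hpre i h hi', fun i h hi' => hsuf i h hi'⟩

-- a prefix that is all-true followed by an all-false tail is the filter
theorem take_eq_filter {α : Type} (p : α → Bool) :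
    ∀ (l : List α) (r : Nat), r ≤ l.length →
      (∀ (i : Nat) (h : i < l.length), i < r → p l[i] = true) →
      (∀ (i : Nat) (h : i < l.length), r ≤ i → p l[i] = false) →
      l.take r = l.filter p := by
  intro l
  induction l with
  | nil => intro r _ _ _; simp
  | cons a l ihl =>
    intro r hr hpre hsuf
    cases r with
    | zero =>
      have ha : p a = false := hsuf 0 (by simp) (by omega)
      rw [List.take_zero, List.filter_cons, if_neg (by simp [ha])]
      exact (ihl 0 (by omega) (fun i h hi => by omega)
        (fun i h _ => by simpa using hsuf (i + 1) (by simpa using Nat.succ_lt_succ h) (by omega))).symm ▸ rfl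
    | succ r =>
      have ha : p a = true := hpre 0 (by simp) (by omega)
      rw [List.take_succ_cons, List.filter_cons, if_pos (by simp [ha])]
      congr 1
      exact ihl r (by simpa using hr)
        (fun i h hi => by simpa using hpre (i + 1) (by simpa using Nat.succ_lt_succ h) (by omega))
        (fun i h hi => by simpa using hsuf (i + 1) (by simpa using Nat.succ_lt_succ h) (by omega))

-- Source B's per-laptop match list, characterised: the matching shelves in input order
theorem matches_eq (thresh c : Int) (shelf : List (String × List Int)) :
    PySem.List.sorted
      (((PySem.List.slice
          (PySem.List.sorted ((PySem.List.enumerate shelf).map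
            (fun ic => (PySem.List.pyGetD ic.2.2 0 0, ic.1, ic.2.1, PySem.List.pyGetD ic.2.2 2 0 + thresh)))
            (fun t => t.1))
          none
          (some (bSearch
            ((PySem.List.sorted ((PySem.List.enumerate shelf).map
              (fun ic => (PySem.List.pyGetD ic.2.2 0 0, ic.1, ic.2.1, PySem.List.pyGetD ic.2.2 2 0 + thresh)))
              (fun t => t.1)).map (fun t => t.1))
            (c + thresh) 0
            (((PySem.List.sorted ((PySem.List.enumerate shelf).map
              (fun ic => (PySem.List.pyGetD ic.2.2 0 0, ic.1, ic.2.1, PySem.List.pyGetD ic.2.2 2 0 + thresh)))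
              (fun t => t.1)).map (fun t => t.1)).length : Int)))).filter
        (fun t => decide (c < t.2.2.2))).map (fun t => (t.2.1, t.2.2.1)))
      (fun t => t.1)
    = ((PySem.List.enumerate shelf).filter (fun is => adHit thresh c is.2.2)).map
        (fun is => (is.1, is.2.1)) := by
  set g : Int × (String × List Int) → Int × Int × String × Int :=
    fun ic => (PySem.List.pyGetD ic.2.2 0 0, ic.1, ic.2.1, PySem.List.pyGetD ic.2.2 2 0 + thresh) with hg
  set G := (PySem.List.enumerate shelf).map g with hG
  set bl := PySem.List.sorted G (fun t => t.1) with hbl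
  set lefts := bl.map (fun t => t.1) with hlefts
  have hperm : bl.Perm G := PySem.List.sorted_perm G (fun t => t.1) false
  have hpw : bl.Pairwise (fun a b => a.1 ≤ b.1) := PySem.List.sorted_pairwise G (fun t => t.1)
  have hlpw : lefts.Pairwise (· ≤ ·) := by
    rw [hlefts, List.pairwise_map]; exact hpw
  set r := bSearch lefts (c + thresh) 0 (lefts.length : Int) with hr
  obtain ⟨hr0, hrle, hrpre, hrsuf⟩ := bSearch_spec lefts (c + thresh) hlpw
    ((lefts.length : Int) - 0).toNat 0 (lefts.length : Int) rfl (le_refl 0) (by positivity)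
    (le_refl _) (fun i h hi => by omega) (fun i h hi => by omega)
  have hlen : lefts.length = bl.length := by rw [hlefts, List.length_map]
  have htake : PySem.List.slice bl none (some r) = bl.take r.toNat :=
    PySem.List.slice_to bl hr0
  have hfil : bl.take r.toNat = bl.filter (fun t => decide (t.1 < c + thresh)) := by
    apply take_eq_filter
    · omega
    · intro i h hi
      have := hrpre i (by omega) hi
      simp only [hlefts, List.getElem_map] at this
      simpa using this
    · intro i h hi
      have := hrsuf i (by omega) hi
      simp only [hlefts, List.getElem_map] at this
      simpa using this
  rw [htake, hfil, List.filter_filter]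
  apply PySem.List.sorted_eq_of_perm_of_pairwise_lt
  · -- permutation with the input-order match list
    have h1 : (bl.filter (fun t => decide (c < t.2.2.2) && decide (t.1 < c + thresh))).Perm
        (G.filter (fun t => decide (c < t.2.2.2) && decide (t.1 < c + thresh))) :=
      hperm.filter _
    have h2 : G.filter (fun t => decide (c < t.2.2.2) && decide (t.1 < c + thresh))
        = ((PySem.List.enumerate shelf).filter (fun is => adHit thresh c is.2.2)).map g := by
      rw [hG, List.filter_map]
      rfl
    have h3 := h1.map (fun t : Int × Int × String × Int => (t.2.1, t.2.2.1))
    rw [h2, List.map_map] at h3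
    exact h3.symm
  · -- strictly increasing shelf indices
    rw [List.pairwise_map]
    exact ((PySem.List.pairwise_lt_enumerate shelf 0).filter _).imp (fun h => h)

-- the two per-laptop passes are the same (Dict × Dict)-transformation
theorem step_eq (thresh : Int) (shelf : List (String × List Int))
    (hs4 : ∀ s ∈ shelf, s.2.length = 4)
    (lp : String × List Int) (hl4 : lp.2.length = 4)
    (st : PySem.Dict String String × PySem.Dict String String) :
    shelf.foldl (fun st sp =>
        match lp.2, sp.2 with
        | [x1, _y1, x2, _y2], [xx1, _yy1, xx2, _yy2] =>
          if x1 + PySem.Int.floordiv (x2 - x1) 2 < xx2 + thresh ∧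
             x1 + PySem.Int.floordiv (x2 - x1) 2 > xx1 - thresh then
            (st.1.insert sp.1 lp.1, st.2.insert sp.1 lp.1)
          else st
        | _, _ => st) st
      = bStep thresh
          (PySem.List.sorted ((PySem.List.enumerate shelf).map
            (fun ic => (PySem.List.pyGetD ic.2.2 0 0, ic.1, ic.2.1, PySem.List.pyGetD ic.2.2 2 0 + thresh)))
            (fun t => t.1))
          ((PySem.List.sorted ((PySem.List.enumerate shelf).map
            (fun ic => (PySem.List.pyGetD ic.2.2 0 0, ic.1, ic.2.1, PySem.List.pyGetD ic.2.2 2 0 + thresh)))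
            (fun t => t.1)).map (fun t => t.1))
          st lp := by
  obtain ⟨x1, y1, x2, y2, hx⟩ := list_len4 lp.2 hl4
  have hB : bStep thresh
      (PySem.List.sorted ((PySem.List.enumerate shelf).map
        (fun ic => (PySem.List.pyGetD ic.2.2 0 0, ic.1, ic.2.1, PySem.List.pyGetD ic.2.2 2 0 + thresh)))
        (fun t => t.1))
      ((PySem.List.sorted ((PySem.List.enumerate shelf).map
        (fun ic => (PySem.List.pyGetD ic.2.2 0 0, ic.1, ic.2.1, PySem.List.pyGetD ic.2.2 2 0 + thresh)))
        (fun t => t.1)).map (fun t => t.1))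
      st lp
      = shelf.foldl (fun st sp =>
          if adHit thresh (x1 + PySem.Int.floordiv (x2 - x1) 2) sp.2 then
            (st.1.insert sp.1 lp.1, st.2.insert sp.1 lp.1)
          else st) st := by
    unfold bStep
    rw [hx, bUnpack4_eq]
    dsimp only
    rw [matches_eq, List.foldl_map, List.foldl_filter]
    exact foldl_enum shelf
      (fun st sp => if adHit thresh (x1 + PySem.Int.floordiv (x2 - x1) 2) sp.2 then
        (st.1.insert sp.1 lp.1, st.2.insert sp.1 lp.1) else st) 0 st
  rw [hB]
  apply PySem.List.foldl_congr_mem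
  intro acc sp hsp
  obtain ⟨xx1, yy1, xx2, yy2, hsx⟩ := list_len4 sp.2 (hs4 sp hsp)
  rw [hx, hsx]
  show (if x1 + PySem.Int.floordiv (x2 - x1) 2 < xx2 + thresh ∧
           x1 + PySem.Int.floordiv (x2 - x1) 2 > xx1 - thresh then
          (acc.1.insert sp.1 lp.1, acc.2.insert sp.1 lp.1) else acc)
      = (if adHit thresh (x1 + PySem.Int.floordiv (x2 - x1) 2) [xx1, yy1, xx2, yy2] then
          (acc.1.insert sp.1 lp.1, acc.2.insert sp.1 lp.1) else acc)
  have hget0 : PySem.List.pyGetD [xx1, yy1, xx2, yy2] 0 0 = xx1 := by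
    simp [PySem.List.pyGetD, PySem.List.pyGet?, PySem.List.pyIdx?]
  have hget2 : PySem.List.pyGetD [xx1, yy1, xx2, yy2] 2 0 = xx2 := by
    simp [PySem.List.pyGetD, PySem.List.pyGet?, PySem.List.pyIdx?]
  unfold adHit
  rw [hget0, hget2]
  by_cases hc : (x1 + PySem.Int.floordiv (x2 - x1) 2 < xx2 + thresh ∧
                 x1 + PySem.Int.floordiv (x2 - x1) 2 > xx1 - thresh)
  · rw [if_pos hc, if_pos (by simp only [Bool.and_eq_true, decide_eq_true_eq]; exact ⟨hc.1, by omega⟩)]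
  · rw [if_neg hc, if_neg (by
      simp only [Bool.and_eq_true, decide_eq_true_eq]
      rintro ⟨h1, h2⟩
      exact hc ⟨h1, by omega⟩)]

-- ===== VERDICT (by name: the statement is the Claim_ definition above) =====
theorem allocate_data_spec : Claim_equal_allocate_data := by
  intro lap shelf thresh _hdom hpre
  obtain ⟨_hlnd, _hsnd, hl4, hs4⟩ := hpre
  unfold Spec_allocate_data allocate_data allocate_data_alt
  dsimp only
  have hst : lap.foldl
      (fun st lp =>
        shelf.foldl (fun st sp =>
          match lp.2, sp.2 with
          | [x1, _y1, x2, _y2], [xx1, _yy1, xx2, _yy2] =>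
            if x1 + PySem.Int.floordiv (x2 - x1) 2 < xx2 + thresh ∧
               x1 + PySem.Int.floordiv (x2 - x1) 2 > xx1 - thresh then
              (st.1.insert sp.1 lp.1, st.2.insert sp.1 lp.1)
            else st
          | _, _ => st) st)
      (PySem.Dict.empty, shelf.foldl (fun d p => d.insert p.1 "Empty-") PySem.Dict.empty)
    = lap.foldl
      (bStep thresh
        (PySem.List.sorted ((PySem.List.enumerate shelf).map
          (fun ic => (PySem.List.pyGetD ic.2.2 0 0, ic.1, ic.2.1, PySem.List.pyGetD ic.2.2 2 0 + thresh)))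
          (fun t => t.1))
        ((PySem.List.sorted ((PySem.List.enumerate shelf).map
          (fun ic => (PySem.List.pyGetD ic.2.2 0 0, ic.1, ic.2.1, PySem.List.pyGetD ic.2.2 2 0 + thresh)))
          (fun t => t.1)).map (fun t => t.1)))
      (PySem.Dict.empty, shelf.foldl (fun d p => d.insert p.1 "Empty-") PySem.Dict.empty) := by
    apply PySem.List.foldl_congr_mem
    intro st lp hlp
    exact step_eq thresh shelf hs4 lp (hl4 lp hlp) st
  rw [hst]
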